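-- pv_equiv track=rewrite | github.com/Adee81/Algoritmusok | 01_Kereses_rendezes/KnightL_on_a_Chessboard.py | knightlOnAChessboard
-- ===== SOURCE A (Python) =====
-- def knightlOnAChessboard(n):
--     result = [[0] * (n - 1) for _ in range(n - 1)]
--
--     for a in range(1, n):
--         for b in range(1, n):
--             queue = [(0, 0, 0)]
--             visited = [[False] * n for _ in range(n)]
--             visited[0][0] = True
--
--             found = False
--
--             while queue and not found:
--                 x, y, steps = queue.pop(0)
--
--                 if (x, y) == (n - 1, n - 1):
--                     result[a - 1][b - 1] = steps
--                     found = True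
--                     break
--
--                 moves = [
--                     (x + a, y + b), (x + a, y - b), (x - a, y + b), (x - a, y - b),
--                     (x + b, y + a), (x + b, y - a), (x - b, y + a), (x - b, y - a)
--                 ]
--
--                 for nx, ny in moves:
--                     if 0 <= nx < n and 0 <= ny < n and not visited[nx][ny]:
--                         visited[nx][ny] = True
--                         queue.append((nx, ny, steps + 1))
--
--             if not found:
--                 result[a - 1][b - 1] = -1
--
--     return result
-- ===== SOURCE B (Python) =====
-- def knightlOnAChessboard(n):
--     # Level-synchronous BFS per jump pair, with a visited set instead of A's
--     # list.pop(0) queue; exploits the (a,b) <-> (b,a) symmetry of the move set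
--     # to run the BFS only for b >= a and mirror the result across the diagonal.
--     target = (n - 1, n - 1)
--     result = [[0] * (n - 1) for _ in range(n - 1)]
--     for a in range(1, n):
--         for b in range(a, n):
--             deltas = ((a, b), (a, -b), (-a, b), (-a, -b),
--                       (b, a), (b, -a), (-b, a), (-b, -a))
--             visited = {(0, 0)}
--             frontier = [(0, 0)]
--             steps = 0
--             ans = -1
--             while frontier:
--                 if target in frontier:
--                     ans = steps
--                     break
--                 nxt = []
--                 for x, y in frontier:
--                     for dx, dy in deltas:
--                         nx, ny = x + dx, y + dy
--                         if 0 <= nx < n and 0 <= ny < n and (nx, ny) not in visited: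
--                             visited.add((nx, ny))
--                             nxt.append((nx, ny))
--                 frontier = nxt
--                 steps += 1
--             result[a - 1][b - 1] = ans
--             result[b - 1][a - 1] = ans
--     return result
-- ===== Notes on version B (the rewrite author's own statement) =====
-- stated objective: faster
-- what changed: The node-at-a-time BFS queue with list.pop(0) (linear-time pops, per-node step counters, an n-by-n visited matrix) is replaced by a level-synchronous BFS using a visited set, run only for jump pairs with a <= b and mirrored across the diagonal since the move set is symmetric in (a,b); intended as faster, measured ~2.1x in a timing run.
import Mathlib
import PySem

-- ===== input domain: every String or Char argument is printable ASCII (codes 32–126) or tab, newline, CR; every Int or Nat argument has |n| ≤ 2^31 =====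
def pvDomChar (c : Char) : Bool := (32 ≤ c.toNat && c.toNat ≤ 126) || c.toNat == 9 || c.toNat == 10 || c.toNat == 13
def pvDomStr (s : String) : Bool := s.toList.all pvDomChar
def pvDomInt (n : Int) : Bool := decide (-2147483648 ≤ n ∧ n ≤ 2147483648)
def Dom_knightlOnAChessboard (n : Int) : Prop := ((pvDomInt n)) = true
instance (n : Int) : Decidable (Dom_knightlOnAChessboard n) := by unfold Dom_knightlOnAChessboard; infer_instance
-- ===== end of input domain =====

-- B replaces A's per-node queue BFS (list.pop(0), O(queue) per pop) by a level-synchronous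
-- whole-frontier BFS with a visited set, run only for a ≤ b and mirrored across the diagonal
-- (the move set is symmetric in (a,b)); intended as faster, measured ~2.1x on the timing
-- run's generated inputs. Return value only; no argument is mutated.

-- ===== PORT A =====
-- A's `visited` boolean matrix is represented as the set (list) of cells set to True:
-- A only ever reads/writes single cells, so membership in this list is exactly `visited[nx][ny]`.
def movesA (a b x y : Int) : List (Int × Int) :=
  [(x + a, y + b), (x + a, y - b), (x - a, y + b), (x - a, y - b),
   (x + b, y + a), (x + b, y - a), (x - b, y + a), (x - b, y - a)]

-- one `if 0 <= nx < n and 0 <= ny < n and not visited[nx][ny]` body: enqueue with steps s, mark visited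
def pushA (n : Int) (s : Int) (st : List (Int × Int × Int) × List (Int × Int)) (c : Int × Int) :
    List (Int × Int × Int) × List (Int × Int) :=
  if 0 ≤ c.1 ∧ c.1 < n ∧ 0 ≤ c.2 ∧ c.2 < n ∧ c ∉ st.2 then
    (st.1 ++ [(c.1, c.2, s)], st.2 ++ [c])
  else st

-- the `while queue and not found` loop; fuel n.toNat*n.toNat + 2 provably suffices (see lemmas)
def loopA (n a b : Int) : Nat → List (Int × Int × Int) → List (Int × Int) → Int
  | 0, _, _ => -1
  | _ + 1, [], _ => -1
  | f + 1, (x, y, s) :: rest, vis =>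
    if x = n - 1 ∧ y = n - 1 then s
    else
      let st := (movesA a b x y).foldl (pushA n (s + 1)) (rest, vis)
      loopA n a b f st.1 st.2

-- result[a-1][b-1] is assigned exactly once, in row-major loop order: ported as nested maps over the ranges
def knightlOnAChessboard (n : Int) : List (List Int) :=
  (PySem.List.pyRange 1 n 1).map fun a =>
    (PySem.List.pyRange 1 n 1).map fun b =>
      loopA n a b (n.toNat * n.toNat + 2) [(0, 0, 0)] [(0, 0)]

-- ===== PORT B =====
def deltasB (a b : Int) : List (Int × Int) :=
  [(a, b), (a, -b), (-a, b), (-a, -b), (b, a), (b, -a), (-b, a), (-b, -a)]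

-- one `if 0 <= nx < n and 0 <= ny < n and (nx, ny) not in visited` body: mark visited, append to nxt
def pushB (n : Int) (st : List (Int × Int) × PySem.Set (Int × Int)) (c : Int × Int) :
    List (Int × Int) × PySem.Set (Int × Int) :=
  if 0 ≤ c.1 ∧ c.1 < n ∧ 0 ≤ c.2 ∧ c.2 < n ∧ c ∉ st.2 then
    (st.1 ++ [c], PySem.Set.add st.2 c)
  else st

-- the `for x, y in frontier: for dx, dy in deltas:` body
def expandB (n a b : Int) (st : List (Int × Int) × PySem.Set (Int × Int)) (c : Int × Int) :
    List (Int × Int) × PySem.Set (Int × Int) :=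
  (deltasB a b).foldl (fun st d => pushB n st (c.1 + d.1, c.2 + d.2)) st

-- the `while frontier` loop; same sufficient fuel as A's port
def loopB (n a b : Int) : Nat → List (Int × Int) → PySem.Set (Int × Int) → Int → Int
  | 0, _, _, _ => -1
  | f + 1, frontier, vis, steps =>
    if frontier = [] then -1
    else if (n - 1, n - 1) ∈ frontier then steps
    else
      let st := frontier.foldl (expandB n a b) ([], vis)
      loopB n a b f st.1 st.2 (steps + 1)

-- one BFS of Source B's inner `while frontier` loop
def bfsB (n a b : Int) : Int :=
  loopB n a b (n.toNat * n.toNat + 2) [(0, 0)] (PySem.Set.ofList [(0, 0)]) 0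

-- Source B runs the BFS only for a ≤ b and assigns result[a-1][b-1] and result[b-1][a-1] both;
-- so the finished matrix holds, cellwise, the BFS value of (min(a,b), max(a,b)): ported cellwise.
def knightlOnAChessboard_alt (n : Int) : List (List Int) :=
  (PySem.List.pyRange 1 n 1).map fun a =>
    (PySem.List.pyRange 1 n 1).map fun b =>
      if b < a then bfsB n b a else bfsB n a b

-- ===== PRECONDITION & SPEC =====
def Spec_knightlOnAChessboard (n : Int) (out : List (List Int)) : Prop := out = knightlOnAChessboard_alt n
instance (n : Int) (out : List (List Int)) : Decidable (Spec_knightlOnAChessboard n out) := by unfold Spec_knightlOnAChessboard; infer_instance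

-- ===== CLAIM (what is proved, stated in full; the proofs are below) =====
def Claim_equal_knightlOnAChessboard : Prop := ∀ (n : Int), Dom_knightlOnAChessboard n → Spec_knightlOnAChessboard n (knightlOnAChessboard n)

-- ===== LEMMAS AND PROOFS =====

-- all board cells, and the count of cells not yet visited (the termination measure)
def board (n : Int) : List (Int × Int) :=
  (PySem.List.pyRange 0 n 1) ×ˢ (PySem.List.pyRange 0 n 1)

def uc (n : Int) (v : List (Int × Int)) : Nat := (board n).countP fun c => !decide (c ∈ v)

def tagS (s : Int) (c : Int × Int) : Int × Int × Int := (c.1, c.2, s)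

theorem mem_board {n x y : Int} (hx0 : 0 ≤ x) (hx : x < n) (hy0 : 0 ≤ y) (hy : y < n) :
    (x, y) ∈ board n := by
  unfold board
  rw [SProd.sprod, List.instSProd, List.pair_mem_product]
  simp only [PySem.List.mem_pyRange_one]
  omega

theorem countP_lt_of_mem {α : Type} {l : List α} {p q : α → Bool} {x : α}
    (himp : ∀ a, q a = true → p a = true) (hx : x ∈ l) (hp : p x = true) (hq : q x = false) :
    l.countP q < l.countP p := by
  induction l with
  | nil => cases hx
  | cons a t ih =>
    rcases List.mem_cons.1 hx with rfl | hxt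
    · simp only [List.countP_cons, hp, hq]
      have := List.countP_mono_left (l := t) (fun a ha hq => himp a hq)
      simp
      omega
    · have := ih hxt
      simp only [List.countP_cons]
      by_cases hqa : q a = true
      · simp [hqa, himp a hqa]; omega
      · simp only [Bool.not_eq_true] at hqa
        simp [hqa]; by_cases hpa : p a = true <;> simp [hpa] <;> omega

theorem uc_append_lt {n : Int} {v : List (Int × Int)} {c : Int × Int}
    (hb : c ∈ board n) (hv : c ∉ v) : uc n (v ++ [c]) < uc n v := by
  apply countP_lt_of_mem (x := c) _ hb
  · simp [hv]
  · simp
  · intro a h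
    simp only [Bool.not_eq_true', decide_eq_false_iff_not, List.mem_append] at h ⊢
    tauto

-- pushB's measure (|out| + unvisited count) never increases
theorem pushB_measure (n : Int) (st : List (Int × Int) × List (Int × Int)) (c : Int × Int) :
    (pushB n st c).1.length + uc n (pushB n st c).2 ≤ st.1.length + uc n st.2 := by
  unfold pushB
  split
  · rename_i h
    obtain ⟨h1, h2, h3, h4, h5⟩ := h
    have hb : c ∈ board n := by obtain ⟨cx, cy⟩ := c; exact mem_board h1 h2 h3 h4
    have hadd : PySem.Set.add st.2 c = st.2 ++ [c] := by
      simp [PySem.Set.add, PySem.Set.contains, h5]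
    rw [hadd]
    have := uc_append_lt hb h5
    simp only [List.length_append, List.length_cons, List.length_nil]
    omega
  · exact le_rfl

theorem foldl_pushB_measure (n : Int) (ms : List (Int × Int))
    (st : List (Int × Int) × List (Int × Int)) :
    (ms.foldl (pushB n) st).1.length + uc n (ms.foldl (pushB n) st).2 ≤ st.1.length + uc n st.2 := by
  induction ms generalizing st with
  | nil => exact le_rfl
  | cons m t ih => exact le_trans (ih (pushB n st m)) (pushB_measure n st m)

theorem expandB_measure (n a b : Int) (st : List (Int × Int) × List (Int × Int)) (c : Int × Int) :
    (expandB n a b st c).1.length + uc n (expandB n a b st c).2 ≤ st.1.length + uc n st.2 := by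
  unfold expandB
  rw [show ((deltasB a b).foldl (fun st d => pushB n st (c.1 + d.1, c.2 + d.2)) st)
      = (((deltasB a b).map fun d => (c.1 + d.1, c.2 + d.2)).foldl (pushB n) st) by
    rw [List.foldl_map]]
  exact foldl_pushB_measure n _ st

theorem foldl_expandB_measure (n a b : Int) (F : List (Int × Int))
    (st : List (Int × Int) × List (Int × Int)) :
    (F.foldl (expandB n a b) st).1.length + uc n (F.foldl (expandB n a b) st).2
      ≤ st.1.length + uc n st.2 := by
  induction F generalizing st with
  | nil => exact le_rfl
  | cons m t ih => exact le_trans (ih (expandB n a b st m)) (expandB_measure n a b st m)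

-- accumulator shift for the B-side fold: appended output does not affect the guards
theorem foldl_pushB_shift (n : Int) (ms : List (Int × Int)) (g : List (Int × Int))
    (v : List (Int × Int)) :
    ms.foldl (pushB n) (g, v)
      = (g ++ (ms.foldl (pushB n) ([], v)).1, (ms.foldl (pushB n) ([], v)).2) := by
  induction ms generalizing g v with
  | nil => simp
  | cons m t ih =>
    simp only [List.foldl_cons]
    by_cases h : 0 ≤ m.1 ∧ m.1 < n ∧ 0 ≤ m.2 ∧ m.2 < n ∧ m ∉ v
    · have hadd : PySem.Set.add v m = v ++ [m] := by
        simp [PySem.Set.add, PySem.Set.contains, h.2.2.2.2]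
      have e1 : ∀ g' : List (Int × Int), pushB n (g', v) m = (g' ++ [m], v ++ [m]) := by
        intro g'; simp only [pushB]; rw [if_pos h, hadd]
      rw [e1 g, e1 [], ih (g ++ [m]), ih ([] ++ [m])]
      simp
    · have e2 : ∀ g' : List (Int × Int), pushB n (g', v) m = (g', v) := by
        intro g'; simp only [pushB]; rw [if_neg h]
      rw [e2 g, e2 []]
      exact ih g v
      
-- A's enqueue fold equals B's fold, with the new cells tagged with their step count
theorem foldl_pushA_eq (n s : Int) (ms : List (Int × Int)) (q : List (Int × Int × Int))
    (v : List (Int × Int)) :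
    ms.foldl (pushA n s) (q, v)
      = (q ++ ((ms.foldl (pushB n) ([], v)).1.map (tagS s)), (ms.foldl (pushB n) ([], v)).2) := by
  induction ms generalizing q v with
  | nil => simp
  | cons m t ih =>
    simp only [List.foldl_cons]
    by_cases h : 0 ≤ m.1 ∧ m.1 < n ∧ 0 ≤ m.2 ∧ m.2 < n ∧ m ∉ v
    · have hadd : PySem.Set.add v m = v ++ [m] := by
        simp [PySem.Set.add, PySem.Set.contains, h.2.2.2.2]
      have e1 : pushA n s (q, v) m = (q ++ [(m.1, m.2, s)], v ++ [m]) := by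
        simp only [pushA]; rw [if_pos h]
      have e1' : pushB n ([], v) m = ([] ++ [m], v ++ [m]) := by
        simp only [pushB]; rw [if_pos h, hadd]
      rw [e1, e1', ih (q ++ [(m.1, m.2, s)]), foldl_pushB_shift n t ([] ++ [m]) (v ++ [m])]
      simp [tagS]
    · have e2 : pushA n s (q, v) m = (q, v) := by
        simp only [pushA]; rw [if_neg h]
      have e2' : pushB n ([], v) m = ([], v) := by
        simp only [pushB]; rw [if_neg h]
      rw [e2, e2']
      exact ih q v

theorem expandB_shift (n a b : Int) (c : Int × Int) (g v : List (Int × Int)) :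
    expandB n a b (g, v) c
      = (g ++ (expandB n a b ([], v) c).1, (expandB n a b ([], v) c).2) := by
  unfold expandB
  rw [show ∀ st, ((deltasB a b).foldl (fun st d => pushB n st (c.1 + d.1, c.2 + d.2)) st)
      = (((deltasB a b).map fun d => (c.1 + d.1, c.2 + d.2)).foldl (pushB n) st) from
    fun st => by rw [List.foldl_map]]
  rw [foldl_pushB_shift]
  simp [List.foldl_map]

-- A after popping through a target-free level equals A at the start of the next level
theorem loopA_level (n a b s : Int) (F G v : List (Int × Int)) (fA : Nat)
    (hT : (n - 1, n - 1) ∉ F) :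
    loopA n a b (F.length + fA) (F.map (tagS s) ++ G.map (tagS (s + 1))) v
      = loopA n a b fA ((F.foldl (expandB n a b) (G, v)).1.map (tagS (s + 1)))
          (F.foldl (expandB n a b) (G, v)).2 := by
  induction F generalizing G v with
  | nil => simp
  | cons c F' ih =>
    obtain ⟨x, y⟩ := c
    have hne : ¬(x = n - 1 ∧ y = n - 1) := by
      intro ⟨h1, h2⟩; exact hT (by simp [h1, h2])
    simp only [List.length_cons, List.map_cons, List.cons_append, Nat.succ_add]
    rw [show tagS s (x, y) = (x, y, s) from rfl,
      show (F'.length + fA).succ = (F'.length + fA) + 1 from rfl]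
    rw [loopA]
    rw [if_neg hne]
    simp only []
    have hmv : (movesA a b x y) = ((deltasB a b).map fun d => (x + d.1, y + d.2)) := rfl
    rw [hmv, show (((deltasB a b).map fun d => (x + d.1, y + d.2)).foldl (pushA n (s + 1))
        (F'.map (tagS s) ++ G.map (tagS (s + 1)), v)) = _ from
      foldl_pushA_eq n (s + 1) _ _ v]
    simp only [List.foldl_cons]
    have hexp : expandB n a b (G, v) (x, y)
        = (G ++ (expandB n a b ([], v) (x, y)).1, (expandB n a b ([], v) (x, y)).2) :=
      expandB_shift n a b (x, y) G v
    have hx : ((deltasB a b).map fun d => (x + d.1, y + d.2)).foldl (pushB n) ([], v)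
        = expandB n a b ([], v) (x, y) := by
      unfold expandB; rw [List.foldl_map]
    rw [hx, hexp]
    have := ih (G ++ (expandB n a b ([], v) (x, y)).1) (expandB n a b ([], v) (x, y)).2
      (fun h => hT (List.mem_cons_of_mem _ h))
    simpa [List.map_append, List.append_assoc] using this

-- if the target is in the current level, A pops to it and returns its step count
theorem loopA_found (n a b s : Int) (F v : List (Int × Int)) (G : List (Int × Int × Int)) (fA : Nat)
    (hT : (n - 1, n - 1) ∈ F) (hf : F.length ≤ fA) :
    loopA n a b fA (F.map (tagS s) ++ G) v = s := by
  induction F generalizing G v fA with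
  | nil => cases hT
  | cons c F' ih =>
    obtain ⟨x, y⟩ := c
    obtain ⟨fA, rfl⟩ : ∃ f, fA = f + 1 := ⟨fA - 1, by simp at hf; omega⟩
    simp only [List.map_cons, List.cons_append, tagS]
    by_cases hc : x = n - 1 ∧ y = n - 1
    · simp [loopA, hc]
    · have hT' : (n - 1, n - 1) ∈ F' := by
        rcases List.mem_cons.1 hT with h | h
        · exact absurd (Prod.mk.injEq .. ▸ h) (by simpa [eq_comm] using hc)
        · exact h
      simp only [loopA, hc, if_neg, not_false_iff]
      have hmv : (movesA a b x y) = ((deltasB a b).map fun d => (x + d.1, y + d.2)) := rfl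
      rw [hmv, foldl_pushA_eq n (s + 1) _ _ v]
      have := ih (v := ((((deltasB a b).map fun d => (x + d.1, y + d.2)).foldl (pushB n) ([], v)).2))
        (G := G ++ ((((deltasB a b).map fun d => (x + d.1, y + d.2)).foldl (pushB n) ([], v)).1.map (tagS (s + 1))))
        (fA := fA) hT' (by simp at hf ⊢; omega)
      simpa [List.append_assoc, tagS] using this

-- the main correspondence: queue BFS = level BFS, given sufficient fuel on both sides
theorem loopA_eq_loopB (n a b : Int) (fB : Nat) :
    ∀ (fA : Nat) (F v : List (Int × Int)) (s : Int),
      uc n v + 2 ≤ fB → F.length + uc n v + 1 ≤ fA →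
      loopA n a b fA (F.map (tagS s)) v = loopB n a b fB F v s := by
  induction fB with
  | zero => intro _ _ _ _ h; omega
  | succ f ih =>
    intro fA F v s hB hA
    obtain ⟨fA, rfl⟩ : ∃ g, fA = g + 1 := ⟨fA - 1, by omega⟩
    by_cases hF : F = []
    · subst hF; simp [loopA, loopB]
    · by_cases hT : (n - 1, n - 1) ∈ F
      · rw [loopB]
        simp only [hF, if_neg, not_false_iff, hT, if_pos]
        have := loopA_found n a b s F v [] (fA + 1) hT (by simp at hA ⊢; omega)
        simpa using this
      · rw [loopB]
        simp only [hF, hT, if_neg, not_false_iff]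
        have hsplit : fA + 1 = F.length + (fA + 1 - F.length) := by omega
        have hlevel := loopA_level n a b s F [] v (fA + 1 - F.length) hT
        rw [hsplit, show F.map (tagS s) = F.map (tagS s) ++ (List.map (tagS (s+1)) []) by simp,
          hlevel]
        set st := F.foldl (expandB n a b) ([], v) with hst
        have hm := foldl_expandB_measure n a b F ([], v)
        rw [← hst] at hm
        simp only [List.length_nil, Nat.zero_add] at hm
        by_cases hF' : st.1 = []
        · rw [hF']
          obtain ⟨g, hg⟩ : ∃ g, fA + 1 - F.length = g + 1 := ⟨fA - F.length, by omega⟩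
          obtain ⟨g', hg'⟩ : ∃ g', f = g' + 1 := ⟨f - 1, by omega⟩
          rw [hg, hg']
          simp [loopA, loopB]
        · have hlen : 1 ≤ st.1.length := by
            cases h : st.1 with
            | nil => exact absurd h hF'
            | cons _ _ => simp
          exact ih (fA + 1 - F.length) st.1 st.2 (s + 1) (by omega) (by omega)

theorem uc_le (n : Int) (v : List (Int × Int)) : uc n v ≤ n.toNat * n.toNat := by
  have hlen : (board n).length ≤ n.toNat * n.toNat := by
    simp only [board, List.length_product, PySem.List.length_pyRange_one]
    have h0 : (n - 0).toNat = n.toNat := by omega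
    rw [h0]
  exact le_trans List.countP_le_length hlen

-- per-cell equality of the two BFS routines at the fuel both ports use
theorem bfs_cell_eq (n a b : Int) :
    loopA n a b (n.toNat * n.toNat + 2) [(0, 0, 0)] [(0, 0)] = bfsB n a b := by
  unfold bfsB
  have hset : PySem.Set.ofList [((0 : Int), (0 : Int))] = [(0, 0)] := by decide
  rw [hset]
  have huc := uc_le n [((0 : Int), (0 : Int))]
  have := loopA_eq_loopB n a b (n.toNat * n.toNat + 2) (n.toNat * n.toNat + 2)
    [(0, 0)] [(0, 0)] 0 (by omega) (by simp; omega)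
  simpa [tagS] using this

-- membership characterisations of the expansion folds, for the (a,b) <-> (b,a) symmetry
def inb (n : Int) (c : Int × Int) : Prop := 0 ≤ c.1 ∧ c.1 < n ∧ 0 ≤ c.2 ∧ c.2 < n

def mvB (a b : Int) (u : Int × Int) : List (Int × Int) :=
  (deltasB a b).map fun d => (u.1 + d.1, u.2 + d.2)

theorem mem_pushB_fst (n : Int) (st : List (Int × Int) × List (Int × Int)) (m c : Int × Int) :
    c ∈ (pushB n st m).1 ↔ c ∈ st.1 ∨ (c = m ∧ inb n m ∧ m ∉ st.2) := by
  unfold pushB inb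
  by_cases h : 0 ≤ m.1 ∧ m.1 < n ∧ 0 ≤ m.2 ∧ m.2 < n ∧ m ∉ st.2
  · rw [if_pos h]
    simp only [List.mem_append, List.mem_singleton]
    tauto
  · rw [if_neg h]
    tauto

theorem mem_pushB_snd (n : Int) (st : List (Int × Int) × List (Int × Int)) (m c : Int × Int) :
    c ∈ (pushB n st m).2 ↔ c ∈ st.2 ∨ (c = m ∧ inb n m ∧ m ∉ st.2) := by
  unfold pushB inb
  by_cases h : 0 ≤ m.1 ∧ m.1 < n ∧ 0 ≤ m.2 ∧ m.2 < n ∧ m ∉ st.2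
  · rw [if_pos h]
    have hadd : PySem.Set.add st.2 m = st.2 ++ [m] := by
      simp [PySem.Set.add, PySem.Set.contains, h.2.2.2.2]
    rw [hadd]
    simp only [List.mem_append, List.mem_singleton]
    tauto
  · rw [if_neg h]
    tauto

theorem mem_foldl_pushB_fst (n : Int) (ms : List (Int × Int)) :
    ∀ (st : List (Int × Int) × List (Int × Int)) (c : Int × Int),
      c ∈ (ms.foldl (pushB n) st).1 ↔ c ∈ st.1 ∨ (c ∈ ms ∧ inb n c ∧ c ∉ st.2) := by
  induction ms with
  | nil => simp
  | cons m t ih =>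
    intro st c
    simp only [List.foldl_cons]
    rw [ih (pushB n st m) c]
    rw [mem_pushB_fst, mem_pushB_snd]
    simp only [List.mem_cons]
    constructor
    · rintro ((h | ⟨rfl, hi, hv⟩) | ⟨hm, hi, hv⟩) <;> tauto
    · rintro (h | ⟨(rfl | hm), hi, hv⟩)
      · tauto
      · tauto
      · by_cases hcm : c = m <;> tauto

theorem mem_foldl_pushB_snd (n : Int) (ms : List (Int × Int)) :
    ∀ (st : List (Int × Int) × List (Int × Int)) (c : Int × Int),
      c ∈ (ms.foldl (pushB n) st).2 ↔ c ∈ st.2 ∨ (c ∈ ms ∧ inb n c ∧ c ∉ st.2) := by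
  induction ms with
  | nil => simp
  | cons m t ih =>
    intro st c
    simp only [List.foldl_cons]
    rw [ih (pushB n st m) c]
    rw [mem_pushB_snd]
    simp only [List.mem_cons]
    constructor
    · rintro ((h | ⟨rfl, hi, hv⟩) | ⟨hm, hi, hv⟩) <;> tauto
    · rintro (h | ⟨(rfl | hm), hi, hv⟩)
      · tauto
      · tauto
      · by_cases hcm : c = m <;> tauto

theorem expandB_eq_foldl (n a b : Int) (st : List (Int × Int) × List (Int × Int)) (u : Int × Int) :
    expandB n a b st u = (mvB a b u).foldl (pushB n) st := by
  unfold expandB mvB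
  rw [List.foldl_map]

theorem mem_foldl_expandB_fst (n a b : Int) (F : List (Int × Int)) :
    ∀ (st : List (Int × Int) × List (Int × Int)) (c : Int × Int),
      c ∈ (F.foldl (expandB n a b) st).1
        ↔ c ∈ st.1 ∨ (inb n c ∧ c ∉ st.2 ∧ ∃ u ∈ F, c ∈ mvB a b u) := by
  induction F with
  | nil => simp
  | cons u t ih =>
    intro st c
    simp only [List.foldl_cons]
    rw [ih (expandB n a b st u) c, expandB_eq_foldl, mem_foldl_pushB_fst, mem_foldl_pushB_snd]
    simp only [List.mem_cons]
    constructor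
    · rintro ((h | ⟨hm, hi, hv⟩) | ⟨hi, hv, w, hw, hmw⟩)
      · tauto
      · exact Or.inr ⟨hi, hv, u, Or.inl rfl, hm⟩
      · have hv' : c ∉ st.2 := fun h => hv (Or.inl h)
        exact Or.inr ⟨hi, hv', w, Or.inr hw, hmw⟩
    · rintro (h | ⟨hi, hv, w, (rfl | hw), hmw⟩)
      · tauto
      · tauto
      · by_cases hcu : c ∈ mvB a b u
        · tauto
        · exact Or.inr ⟨hi, fun h => (h.elim hv fun ⟨h1, _, _⟩ => hcu h1), w, hw, hmw⟩

theorem mem_foldl_expandB_snd (n a b : Int) (F : List (Int × Int)) :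
    ∀ (st : List (Int × Int) × List (Int × Int)) (c : Int × Int),
      c ∈ (F.foldl (expandB n a b) st).2
        ↔ c ∈ st.2 ∨ (inb n c ∧ c ∉ st.2 ∧ ∃ u ∈ F, c ∈ mvB a b u) := by
  induction F with
  | nil => simp
  | cons u t ih =>
    intro st c
    simp only [List.foldl_cons]
    rw [ih (expandB n a b st u) c, expandB_eq_foldl, mem_foldl_pushB_snd]
    simp only [List.mem_cons]
    constructor
    · rintro ((h | ⟨hm, hi, hv⟩) | ⟨hi, hv, w, hw, hmw⟩)
      · tauto
      · exact Or.inr ⟨hi, hv, u, Or.inl rfl, hm⟩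
      · have hv' : c ∉ st.2 := fun h => hv (Or.inl h)
        exact Or.inr ⟨hi, hv', w, Or.inr hw, hmw⟩
    · rintro (h | ⟨hi, hv, w, (rfl | hw), hmw⟩)
      · tauto
      · tauto
      · by_cases hcu : c ∈ mvB a b u
        · tauto
        · exact Or.inr ⟨hi, fun h => (h.elim hv fun ⟨h1, _, _⟩ => hcu h1), w, hw, hmw⟩

-- the 8-move set is symmetric in (a,b)
theorem mem_mvB_swap (a b : Int) (u c : Int × Int) : c ∈ mvB a b u ↔ c ∈ mvB b a u := by
  simp only [mvB, deltasB, List.map_cons, List.map_nil, List.mem_cons, List.not_mem_nil, or_false]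
  tauto

-- the level BFS returns the same value from set-equal frontiers/visited, with (a,b) swapped
theorem loopB_swap (n a b : Int) (f : Nat) :
    ∀ (F₁ F₂ v₁ v₂ : List (Int × Int)) (s : Int),
      (∀ c, c ∈ F₁ ↔ c ∈ F₂) → (∀ c, c ∈ v₁ ↔ c ∈ v₂) →
      loopB n a b f F₁ v₁ s = loopB n b a f F₂ v₂ s := by
  induction f with
  | zero => intro _ _ _ _ _ _ _; rfl
  | succ f ih =>
    intro F₁ F₂ v₁ v₂ s hF hv
    rw [loopB, loopB]
    have hnil : F₁ = [] ↔ F₂ = [] := by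
      constructor <;> intro h <;> subst h <;>
        [cases h2 : F₂; cases h2 : F₁] <;> try rfl
      · exact absurd ((hF _).2 (h2 ▸ List.mem_cons_self ..)) (List.not_mem_nil)
      · exact absurd ((hF _).1 (h2 ▸ List.mem_cons_self ..)) (List.not_mem_nil)
    by_cases h1 : F₁ = []
    · rw [if_pos h1, if_pos (hnil.1 h1)]
    · rw [if_neg h1, if_neg (fun h => h1 (hnil.2 h))]
      have htgt : ((n - 1, n - 1) ∈ F₁) ↔ ((n - 1, n - 1) ∈ F₂) := hF _
      by_cases ht : (n - 1, n - 1) ∈ F₁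
      · rw [if_pos ht, if_pos (htgt.1 ht)]
      · rw [if_neg ht, if_neg (fun h => ht (htgt.2 h))]
        apply ih
        · intro c
          rw [mem_foldl_expandB_fst, mem_foldl_expandB_fst]
          simp only [List.not_mem_nil, false_or]
          constructor
          · rintro ⟨hi, hm, u, hu, hmu⟩
            exact ⟨hi, fun h => hm ((hv c).2 h), u, (hF u).1 hu, (mem_mvB_swap a b u c).1 hmu⟩
          · rintro ⟨hi, hm, u, hu, hmu⟩
            exact ⟨hi, fun h => hm ((hv c).1 h), u, (hF u).2 hu, (mem_mvB_swap a b u c).2 hmu⟩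
        · intro c
          rw [mem_foldl_expandB_snd, mem_foldl_expandB_snd]
          constructor
          · rintro (h | ⟨hi, hm, u, hu, hmu⟩)
            · exact Or.inl ((hv c).1 h)
            · exact Or.inr ⟨hi, fun h => hm ((hv c).2 h), u, (hF u).1 hu, (mem_mvB_swap a b u c).1 hmu⟩
          · rintro (h | ⟨hi, hm, u, hu, hmu⟩)
            · exact Or.inl ((hv c).2 h)
            · exact Or.inr ⟨hi, fun h => hm ((hv c).1 h), u, (hF u).2 hu, (mem_mvB_swap a b u c).2 hmu⟩

theorem bfsB_swap (n a b : Int) : bfsB n a b = bfsB n b a := by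
  unfold bfsB
  exact loopB_swap n a b _ _ _ _ _ 0 (fun _ => Iff.rfl) (fun _ => Iff.rfl)

-- ===== VERDICT (by name: the statement is the Claim_ definition above) =====
theorem knightlOnAChessboard_spec : Claim_equal_knightlOnAChessboard := by
  intro n _
  unfold Spec_knightlOnAChessboard knightlOnAChessboard knightlOnAChessboard_alt
  refine List.map_congr_left fun a _ => List.map_congr_left fun b _ => ?_
  by_cases hba : b < a
  · rw [if_pos hba, ← bfsB_swap]
    exact bfs_cell_eq n a b
  · rw [if_neg hba]
    exact bfs_cell_eq n a b
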